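-- pv_equiv track=rewrite | github.com/gratefulfrog/ArduGuitar | Ardu2/design/POC-3_MAX395/pyboard/DraftDevt/PS2/PyPS2/Old/is2.py | command2BitList
-- ===== SOURCE A (Python) =====
-- def command2BitList(command):
--     """
--     takes a byte argument and returns a list of 11 values representing
--     the PS/2 message, i.e.
--     '0' start bit
--     8 computed data bits
--     1 computed odd parity bit
--     '1' stop bit
--     This INCLUDES the request to send!!
--     """
--     res = []
--     # odd parity
--     parity = 1
--     # start bit
--     res += [0]
--     for i in range(8):
--         v =(command>>i) & 1
--         parity ^= v
--         res += [v]
--     # partity bit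
--     res +=[parity]
--     # stop bit
--     res +=[1]
--     return res
-- ===== SOURCE B (Python) =====
-- def command2BitList(command):
--     m = command & 0xFF
--     # odd parity of the byte by xor-folding the mask (bit-trick), not per-bit accumulation
--     p = m ^ (m >> 4)
--     p ^= p >> 2
--     p ^= p >> 1
--     # assemble back-to-front: start from [parity, stop], prepend data bits MSB..LSB, then the start bit
--     res = [1 ^ (p & 1), 1]
--     for i in range(7, -1, -1):
--         res = [(m >> i) & 1] + res
--     return [0] + res
-- ===== Notes on version B (the rewrite author's own statement) =====
-- stated objective: alternative
-- what changed: B masks the byte once, computes the odd parity by the classic xor-folding bit-trick (m^=m>>4; m^=m>>2; m^=m>>1) instead of accumulating parity bit by bit, and assembles the frame back-to-front by prepending the data bits MSB-to-LSB onto the [parity, stop] tail, instead of A's forward append loop that carries a parity accumulator.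
import Mathlib
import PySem

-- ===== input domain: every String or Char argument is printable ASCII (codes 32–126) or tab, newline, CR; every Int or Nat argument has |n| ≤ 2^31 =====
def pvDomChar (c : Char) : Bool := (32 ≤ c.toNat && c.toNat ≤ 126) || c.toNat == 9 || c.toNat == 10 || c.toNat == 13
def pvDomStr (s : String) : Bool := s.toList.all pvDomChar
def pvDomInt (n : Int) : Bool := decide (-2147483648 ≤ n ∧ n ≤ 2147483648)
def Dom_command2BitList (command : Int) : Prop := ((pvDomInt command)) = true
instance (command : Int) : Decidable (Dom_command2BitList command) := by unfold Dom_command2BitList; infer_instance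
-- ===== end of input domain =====

-- B masks the byte once, computes odd parity by the xor-folding bit-trick and assembles the frame back-to-front (prepending bits MSB→LSB); objective: alternative (same cost, different algorithm).


-- ===== PORT A =====
-- A: forward loop appending each bit while xor-accumulating the parity
def command2BitList (command : Int) : List Int :=
  let init : List Int × Int := ([0], 1)
  let st := (PySem.List.pyRange 0 8 1).foldl
    (fun (st : List Int × Int) (i : Int) =>
      let v := PySem.Int.band (command >>> i.toNat) 1
      (st.1 ++ [v], PySem.Int.bxor st.2 v)) init
  (st.1 ++ [st.2]) ++ [1]

-- ===== PORT B =====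
-- B: mask the byte, xor-fold it to the parity bit, prepend bits MSB→LSB onto the [parity, stop] tail
def command2BitList_alt (command : Int) : List Int :=
  let m := PySem.Int.band command 255
  let p1 := PySem.Int.bxor m (m >>> 4)
  let p2 := PySem.Int.bxor p1 (p1 >>> 2)
  let p3 := PySem.Int.bxor p2 (p2 >>> 1)
  let res := (PySem.List.pyRange 7 (-1) (-1)).foldl
    (fun (res : List Int) (i : Int) => [PySem.Int.band (m >>> i.toNat) 1] ++ res)
    [PySem.Int.bxor 1 (PySem.Int.band p3 1), 1]
  [0] ++ res

-- ===== PRECONDITION & SPEC =====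
def Spec_command2BitList (command : Int) (out : List Int) : Prop := out = command2BitList_alt command
instance (command : Int) (out : List Int) : Decidable (Spec_command2BitList command out) := by unfold Spec_command2BitList; infer_instance

-- ===== CLAIM (what is proved, stated in full; the proofs are below) =====
def Claim_equal_command2BitList : Prop := ∀ (command : Int), Dom_command2BitList command → Spec_command2BitList command (command2BitList command)

-- ===== LEMMAS AND PROOFS =====

-- Python's a & 255 is a mod 256 (also for negative a)
lemma band255_eq_emod (a : Int) : PySem.Int.band a 255 = a % 256 := by
  unfold PySem.Int.band
  by_cases ha : 0 ≤ a
  · simp only [ha, if_true, show (0:Int) ≤ 255 by norm_num]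
    rw [show ((255:Int)).toNat = 2^8 - 1 from rfl, Nat.and_two_pow_sub_one_eq_mod]
    omega
  · simp only [ha, if_false, if_true, show (0:Int) ≤ 255 by norm_num]
    rw [show ((255:Int)).toNat = 2^8 - 1 from rfl]
    rw [Nat.and_comm, Nat.and_two_pow_sub_one_eq_mod]
    have h2 : (-a - 1).toNat % 2 ^ 8 < 2^8 := Nat.mod_lt _ (by norm_num)
    omega

-- the low 8 bits of a are the bits of a mod 256
lemma bit_lowbits (a : Int) (i : Nat) (h : i < 8) :
    PySem.Int.band (a >>> i) 1 = PySem.Int.band ((a % 256) >>> i) 1 := by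
  rw [PySem.Int.band_one, PySem.Int.band_one,
    PySem.Int.mod_eq_emod_of_pos (by norm_num), PySem.Int.mod_eq_emod_of_pos (by norm_num),
    Int.shiftRight_eq_div_pow, Int.shiftRight_eq_div_pow]
  interval_cases i <;> norm_num <;> omega

-- A's result depends only on command mod 256
lemma portA_mod (a : Int) : command2BitList a = command2BitList (a % 256) := by
  unfold command2BitList
  rw [show PySem.List.pyRange 0 8 1 = [0, 1, 2, 3, 4, 5, 6, 7] from by decide]
  simp only [List.foldl]
  rw [show Int.toNat 0 = 0 from rfl, show Int.toNat 1 = 1 from rfl,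
    show Int.toNat 2 = 2 from rfl, show Int.toNat 3 = 3 from rfl,
    show Int.toNat 4 = 4 from rfl, show Int.toNat 5 = 5 from rfl,
    show Int.toNat 6 = 6 from rfl, show Int.toNat 7 = 7 from rfl]
  rw [bit_lowbits a 0 (by norm_num), bit_lowbits a 1 (by norm_num),
    bit_lowbits a 2 (by norm_num), bit_lowbits a 3 (by norm_num),
    bit_lowbits a 4 (by norm_num), bit_lowbits a 5 (by norm_num),
    bit_lowbits a 6 (by norm_num), bit_lowbits a 7 (by norm_num)]

-- B's result depends only on command mod 256
lemma portB_mod (a : Int) : command2BitList_alt a = command2BitList_alt (a % 256) := by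
  unfold command2BitList_alt
  rw [band255_eq_emod, band255_eq_emod, Int.emod_emod_of_dvd _ (by norm_num)]

-- the two ports agree on every residue 0..255
set_option maxRecDepth 40000 in
set_option maxHeartbeats 1000000 in
lemma key : ∀ n : Fin 256, command2BitList ((n : Nat) : Int) = command2BitList_alt ((n : Nat) : Int) := by decide

-- ===== VERDICT (by name: the statement is the Claim_ definition above) =====
theorem command2BitList_spec : Claim_equal_command2BitList := by
  intro command _
  unfold Spec_command2BitList
  rw [portA_mod, portB_mod]
  have h0 : 0 ≤ command % 256 := Int.emod_nonneg _ (by norm_num)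
  have h1 : command % 256 < 256 := Int.emod_lt_of_pos _ (by norm_num)
  obtain ⟨n, hn⟩ : ∃ n : Nat, command % 256 = (n : Int) :=
    ⟨(command % 256).toNat, (Int.toNat_of_nonneg h0).symm⟩
  rw [hn] at h1 ⊢
  exact key ⟨n, by exact_mod_cast h1⟩
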